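-- pv_equiv track=rewrite | github.com/Plaqueminier/advent-of-code | 2023/3/3.py | read_numbers_near_symbol
-- ===== SOURCE A (Python) =====
-- def read_number_and_erase_it(grid, i, j):
--     number = 0
--     left_offset = 0
--     right_offset = 0
--     while j - left_offset >= 0 and str.isdigit(grid[i][j - left_offset]):
--         left_offset += 1
--     while j + right_offset < len(grid[i]) and str.isdigit(grid[i][j + right_offset]):
--         right_offset += 1
--     number = int(grid[i][j - left_offset + 1 : j + right_offset])
--     for k in range(j - left_offset + 1, j + right_offset):
--         grid[i] = grid[i][:k] + "." + grid[i][k + 1 :]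
--     return number
--
-- def read_numbers_near_symbol(grid, i, j):
--     numbers = []
--     for k in range(-1, 2):
--         for l in range(-1, 2):
--             if i + k >= 0 and i + k < len(grid) and j + l >= 0 and j + l < len(grid[i]):
--                 if str.isdigit(grid[i + k][j + l]):
--                     numbers.append(read_number_and_erase_it(grid, i + k, j + l))
--     return numbers
-- ===== SOURCE B (Python) =====
-- def read_numbers_near_symbol(grid, i, j):
--     # Visit the 3x3 neighbourhood of the symbol; a set of already-read
--     # (row, start) number spans deduplicates, so the grid is never mutated.
--     numbers = []
--     seen = set()
--     for r in range(i - 1, i + 2):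
--         if not (0 <= r < len(grid)):
--             continue
--         for c in range(j - 1, j + 2):
--             if 0 <= c < len(grid[i]) and grid[r][c].isdigit():
--                 s = c
--                 while s > 0 and grid[r][s - 1].isdigit():
--                     s -= 1
--                 if (r, s) in seen:
--                     continue
--                 seen.add((r, s))
--                 e = c + 1
--                 while e < len(grid[r]) and grid[r][e].isdigit():
--                     e += 1
--                 numbers.append(int(grid[r][s:e]))
--     return numbers
-- ===== Notes on version B (the rewrite author's own statement) =====
-- stated objective: alternative
-- what changed: B deduplicates with an explicit set of already-read (row, start) number spans and slices each number out once, instead of A's erase-driven dedup that rewrites the grid row char-by-char after every read so repeat visits see non-digits; B never mutates the grid. Pre_ excludes exactly the inputs on which A raises IndexError (and B raises the same way there).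
import Mathlib
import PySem

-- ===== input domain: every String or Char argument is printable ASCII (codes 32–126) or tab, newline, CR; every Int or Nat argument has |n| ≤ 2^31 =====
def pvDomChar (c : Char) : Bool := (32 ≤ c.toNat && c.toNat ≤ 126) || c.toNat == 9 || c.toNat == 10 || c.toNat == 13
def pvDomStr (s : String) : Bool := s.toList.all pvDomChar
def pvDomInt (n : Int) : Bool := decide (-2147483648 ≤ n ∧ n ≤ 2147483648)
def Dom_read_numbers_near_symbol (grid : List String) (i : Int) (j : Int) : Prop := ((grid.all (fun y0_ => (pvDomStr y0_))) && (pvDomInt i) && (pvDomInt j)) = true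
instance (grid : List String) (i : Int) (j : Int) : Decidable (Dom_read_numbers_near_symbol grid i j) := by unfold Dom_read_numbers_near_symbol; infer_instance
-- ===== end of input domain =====

-- B deduplicates the numbers around the symbol with a set of already-read
-- (row, start) spans instead of A's erase-driven dedup that rewrites the grid
-- char by char (objective: alternative).  A mutates `grid` in place (erases the
-- numbers it read); B does not — the equivalence proved here is about the
-- RETURN value (the Lean ports take the grid by value).

-- ===== PORT A =====
-- termination helpers (cited by the decreasing_by of the loop ports below)
theorem pvDecLeft (j : Int) (off : Nat) (h : 0 ≤ j - (off : Int)) :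
    (j - ((off + 1 : Nat) : Int) + 1).toNat < (j - (off : Int) + 1).toNat := by omega
theorem pvDecRight (L : Int) (j : Int) (off : Nat) (h : j + (off : Int) < L) :
    (L - (j + ((off + 1 : Nat) : Int))).toNat < (L - (j + (off : Int))).toNat := by omega

-- while j - left_offset >= 0 and str.isdigit(grid[i][j - left_offset]): left_offset += 1
-- (index j-off is < len(row) at every call site reached from a digit cell, so the
--  getD-with-' ' read is exact there; ' ' is not a digit, so the guard is exact)
def pvLeftLoop (row : List Char) (j : Int) (off : Nat) : Nat :=
  if h : 0 ≤ j - (off : Int) ∧ PySem.Chars.isdigit (row.getD (j - (off : Int)).toNat ' ') then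
    pvLeftLoop row j (off + 1)
  else off
termination_by (j - (off : Int) + 1).toNat
decreasing_by
  exact pvDecLeft j off h.1

-- while j + right_offset < len(grid[i]) and str.isdigit(grid[i][j + right_offset]): right_offset += 1
def pvRightLoop (row : List Char) (j : Int) (off : Nat) : Nat :=
  if h : j + (off : Int) < (row.length : Int) ∧ PySem.Chars.isdigit (row.getD (j + (off : Int)).toNat ' ') then
    pvRightLoop row j (off + 1)
  else off
termination_by ((row.length : Int) - (j + (off : Int))).toNat
decreasing_by
  exact pvDecRight (row.length : Int) j off h.1

-- for k in range(a, b): row = row[:k] + "." + row[k+1:]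
def pvEraseRange (row : List Char) (a b : Int) : List Char :=
  (PySem.List.pyRange a b 1).foldl
    (fun r k => PySem.List.slice r none (some k) ++ ['.'] ++ PySem.List.slice r (some (k + 1)) none) row

-- read_number_and_erase_it(grid, i, j); returns (number, mutated grid); i ∈ [0, len grid) at call sites
def pvReadNumberAndEraseIt (grid : List String) (i j : Int) : Int × List String :=
  let row := (PySem.List.pyGetD grid i "").toList
  let L := pvLeftLoop row j 0
  let R := pvRightLoop row j 0
  let number := (PySem.Int.ofStr? (String.ofList (PySem.List.slice row (some (j - (L : Int) + 1)) (some (j + (R : Int)))))).getD 0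
  let row' := pvEraseRange row (j - (L : Int) + 1) (j + (R : Int))
  (number, grid.set i.toNat (String.ofList row'))

def read_numbers_near_symbol (grid : List String) (i : Int) (j : Int) : List Int :=
  ((PySem.List.pyRange (-1) 2 1).foldl (fun st k =>
    (PySem.List.pyRange (-1) 2 1).foldl (fun st l =>
      if 0 ≤ i + k ∧ i + k < (st.2.length : Int) ∧ 0 ≤ j + l ∧
         j + l < (((PySem.List.pyGet? st.2 i).getD "").length : Int) then
        -- str.isdigit(grid[i+k][j+l]); index j+l is within the row on every
        -- input admitted by Pre_ (Python raises on the others), ' ' is no digit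
        if PySem.Chars.isdigit ((PySem.List.pyGetD st.2 (i + k) "").toList.getD (j + l).toNat ' ') then
          let res := pvReadNumberAndEraseIt st.2 (i + k) (j + l)
          (st.1 ++ [res.1], res.2)
        else st
      else st) st) (([] : List Int), grid)).1

-- ===== PORT B =====
-- while s > 0 and grid[r][s - 1].isdigit(): s -= 1
-- (index s-1 is < len(row) whenever the loop runs from an in-range digit cell,
--  so the getD-with-' ' read is exact there; ' ' is not a digit)
def altLeft (row : List Char) (s : Nat) : Nat :=
  if 0 < s ∧ PySem.Chars.isdigit (row.getD (s - 1) ' ') then altLeft row (s - 1) else s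
termination_by s
decreasing_by omega

-- while e < len(grid[r]) and grid[r][e].isdigit(): e += 1
theorem pvDecRun (L e : Nat) (h : e < L) : L - (e + 1) < L - e := by omega
def altRight (row : List Char) (e : Nat) : Nat :=
  if h : e < row.length ∧ PySem.Chars.isdigit (row.getD e ' ') then altRight row (e + 1) else e
termination_by row.length - e
decreasing_by
  exact pvDecRun row.length e h.1

def read_numbers_near_symbol_alt (grid : List String) (i : Int) (j : Int) : List Int :=
  ((PySem.List.pyRange (i - 1) (i + 2) 1).foldl (fun st r =>
    if 0 ≤ r ∧ r < (grid.length : Int) then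
      (PySem.List.pyRange (j - 1) (j + 2) 1).foldl (fun st c =>
        if 0 ≤ c ∧ c < (((PySem.List.pyGet? grid i).getD "").length : Int) ∧
            PySem.Chars.isdigit ((PySem.List.pyGetD grid r "").toList.getD c.toNat ' ') then
          let s := altLeft ((PySem.List.pyGetD grid r "").toList) c.toNat
          if PySem.Set.contains st.2 (r, (s : Int)) then st
          else
            let e := altRight ((PySem.List.pyGetD grid r "").toList) (c.toNat + 1)
            (st.1 ++ [(PySem.Int.ofStr? (String.ofList
                (PySem.List.slice ((PySem.List.pyGetD grid r "").toList) (some (s : Int)) (some (e : Int))))).getD 0],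
             PySem.Set.add st.2 (r, (s : Int)))
        else st) st
    else st) (([] : List Int), (PySem.Set.empty : PySem.Set (Int × Int)))).1

-- ===== PRECONDITION & SPEC =====
-- Pre_ excludes exactly the inputs where Python A raises IndexError: i = len(grid)
-- while some neighbour cell passes the first three bound checks (len(grid[i]) is
-- then evaluated), or a checked cell j+l < len(grid[i]) lying beyond the end of
-- the shorter neighbour row grid[i+k].  (B raises the same IndexError there.)
def Pre_read_numbers_near_symbol (grid : List String) (i : Int) (j : Int) : Prop :=
  ∀ k ∈ ([-1, 0, 1] : List Int), ∀ l ∈ ([-1, 0, 1] : List Int),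
    (0 ≤ i + k ∧ i + k < (grid.length : Int) ∧ 0 ≤ j + l) →
      i < (grid.length : Int) ∧
        (j + l < (((PySem.List.pyGet? grid i).getD "").length : Int) →
          j + l < ((grid.getD (i + k).toNat "").length : Int))
instance (grid : List String) (i : Int) (j : Int) : Decidable (Pre_read_numbers_near_symbol grid i j) := by
  unfold Pre_read_numbers_near_symbol; infer_instance

def pvWitness_read_numbers_near_symbol : List String × Int × Int := (["617.", "...*", "12.9"], 1, 3)

def Spec_read_numbers_near_symbol (grid : List String) (i : Int) (j : Int) (out : List Int) : Prop := out = read_numbers_near_symbol_alt grid i j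
instance (grid : List String) (i : Int) (j : Int) (out : List Int) : Decidable (Spec_read_numbers_near_symbol grid i j out) := by unfold Spec_read_numbers_near_symbol; infer_instance

-- ===== CLAIM (what is proved, stated in full; the proofs are below) =====
def Claim_equal_read_numbers_near_symbol : Prop := ∀ (grid : List String) (i : Int) (j : Int), Dom_read_numbers_near_symbol grid i j → Pre_read_numbers_near_symbol grid i j → Spec_read_numbers_near_symbol grid i j (read_numbers_near_symbol grid i j)

-- ===== LEMMAS AND PROOFS =====

-- digit test used by both ports, as a total function of a Nat index
def pvDigN (row : List Char) (q : Nat) : Bool := PySem.Chars.isdigit (row.getD q ' ')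
-- and of an Int index (False for negative indices)
def pvDigI (row : List Char) (c : Int) : Bool := decide (0 ≤ c) && pvDigN row c.toNat

theorem pvDigN_of_ge (row : List Char) (q : Nat) (h : row.length ≤ q) : pvDigN row q = false := by
  simp only [pvDigN, List.getD_eq_getElem?_getD, List.getElem?_eq_none h]
  decide

theorem pvDigN_lt (row : List Char) (q : Nat) (h : pvDigN row q = true) : q < row.length := by
  by_contra hq
  rw [pvDigN_of_ge row q (by omega)] at h
  exact Bool.false_ne_true h

theorem pvDigI_eq (row : List Char) (c : Int) :
    pvDigI row c = true ↔ (0 ≤ c ∧ PySem.Chars.isdigit (row.getD c.toNat ' ') = true) := by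
  simp [pvDigI, pvDigN]

-- properties of A's left scan: all inspected cells up to the final offset are digits,
-- and the final offset is the first non-digit (or falls off the left edge)
theorem pvLeftLoop_prop (row : List Char) (c : Int) (off : Nat) :
    off ≤ pvLeftLoop row c off ∧
    (∀ o : Nat, off ≤ o → o < pvLeftLoop row c off → pvDigI row (c - o) = true) ∧
    pvDigI row (c - (pvLeftLoop row c off : Int)) = false := by
  induction off using pvLeftLoop.induct row c with
  | case1 off h ih =>
    rw [pvLeftLoop, dif_pos h]
    refine ⟨by omega, ?_, ih.2.2⟩
    intro o ho1 ho2
    rcases Nat.eq_or_lt_of_le ho1 with rfl | ho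
    · exact (pvDigI_eq row (c - (off:Int))).mpr ⟨h.1, h.2⟩
    · exact ih.2.1 o ho ho2
  | case2 off h =>
    rw [pvLeftLoop, dif_neg h]
    refine ⟨le_refl _, by omega, ?_⟩
    by_contra hx
    rw [Bool.not_eq_false, pvDigI_eq] at hx
    exact h ⟨hx.1, hx.2⟩

theorem pvRightGuard_iff (row : List Char) (c : Int) (off : Nat) (h0 : 0 ≤ c) :
    (c + (off : Int) < (row.length : Int) ∧ PySem.Chars.isdigit (row.getD (c + (off : Int)).toNat ' ') = true)
      ↔ pvDigI row (c + off) = true := by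
  rw [pvDigI_eq]
  constructor
  · exact fun h => ⟨by omega, h.2⟩
  · intro h
    refine ⟨?_, h.2⟩
    have := pvDigN_lt row (c + (off : Int)).toNat h.2
    omega

theorem pvRightLoop_prop (row : List Char) (c : Int) (h0 : 0 ≤ c) (off : Nat) :
    off ≤ pvRightLoop row c off ∧
    (∀ o : Nat, off ≤ o → o < pvRightLoop row c off → pvDigI row (c + o) = true) ∧
    pvDigI row (c + (pvRightLoop row c off : Int)) = false := by
  induction off using pvRightLoop.induct row c with
  | case1 off h ih =>
    rw [pvRightLoop, dif_pos h]
    refine ⟨by omega, ?_, ih.2.2⟩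
    intro o ho1 ho2
    rcases Nat.eq_or_lt_of_le ho1 with rfl | ho
    · exact (pvRightGuard_iff row c off h0).mp ⟨h.1, h.2⟩
    · exact ih.2.1 o ho ho2
  | case2 off h =>
    rw [pvRightLoop, dif_neg h]
    refine ⟨le_refl _, by omega, ?_⟩
    by_contra hx
    rw [Bool.not_eq_false] at hx
    exact h ((pvRightGuard_iff row c off h0).mpr hx)

-- (s, e) is a maximal digit run of `row`
def pvMaxRun (row : List Char) (s e : Nat) : Prop :=
  s < e ∧ e ≤ row.length ∧ (∀ q : Nat, s ≤ q → q < e → pvDigN row q = true) ∧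
    (s = 0 ∨ pvDigN row (s - 1) = false) ∧ pvDigN row e = false

theorem pvMaxRun_unique (row : List Char) {s e s' e' q : Nat}
    (h1 : pvMaxRun row s e) (h2 : pvMaxRun row s' e')
    (hq1 : s ≤ q ∧ q < e) (hq2 : s' ≤ q ∧ q < e') : s = s' ∧ e = e' := by
  obtain ⟨hlt1, hle1, hdig1, hb1, he1⟩ := h1
  obtain ⟨hlt2, hle2, hdig2, hb2, he2⟩ := h2
  have hss : s = s' := by
    rcases Nat.lt_trichotomy s s' with h | h | h
    · exfalso
      have : pvDigN row (s' - 1) = true := hdig1 (s' - 1) (by omega) (by omega)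
      rcases hb2 with he | hb
      · omega
      · rw [this] at hb; exact absurd hb (by simp)
    · exact h
    · exfalso
      have : pvDigN row (s - 1) = true := hdig2 (s - 1) (by omega) (by omega)
      rcases hb1 with he | hb
      · omega
      · rw [this] at hb; exact absurd hb (by simp)
  refine ⟨hss, ?_⟩
  rcases Nat.lt_trichotomy e e' with h | h | h
  · exfalso
    have : pvDigN row e = true := hdig2 e (by omega) h
    rw [this] at he1; exact absurd he1 (by simp)
  · exact h
  · exfalso
    have : pvDigN row e' = true := hdig1 e' (by omega) h
    rw [this] at he2; exact absurd he2 (by simp)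

-- the span [pvS, pvE) that A's two while-loops find around a digit cell c
def pvS (row : List Char) (c : Int) : Int := c - (pvLeftLoop row c 0 : Int) + 1
def pvE (row : List Char) (c : Int) : Int := c + (pvRightLoop row c 0 : Int)
def pvVal (row : List Char) (c : Int) : Int :=
  (PySem.Int.ofStr? (String.ofList (PySem.List.slice row (some (pvS row c)) (some (pvE row c))))).getD 0
def pvBlank (row : List Char) (c : Int) : List Char := pvEraseRange row (pvS row c) (pvE row c)

theorem pvSpan_maxRun (row : List Char) (c : Int) (h0 : 0 ≤ c) (hd : pvDigN row c.toNat = true) :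
    0 ≤ pvS row c ∧ pvS row c ≤ c ∧ c < pvE row c ∧ (pvE row c : Int) ≤ (row.length : Int) ∧
      pvMaxRun row (pvS row c).toNat (pvE row c).toNat := by
  obtain ⟨-, hldig, hlstop⟩ := pvLeftLoop_prop row c 0
  obtain ⟨-, hrdig, hrstop⟩ := pvRightLoop_prop row c h0 0
  have hdigc : pvDigI row c = true := by
    rw [pvDigI_eq]; exact ⟨h0, hd⟩
  have hL : 1 ≤ pvLeftLoop row c 0 := by
    by_contra hx
    have h1 : pvLeftLoop row c 0 = 0 := by omega
    rw [h1] at hlstop; simp only [Int.natCast_zero, sub_zero] at hlstop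
    rw [hdigc] at hlstop; exact absurd hlstop (by simp)
  have hR : 1 ≤ pvRightLoop row c 0 := by
    by_contra hx
    have h1 : pvRightLoop row c 0 = 0 := by omega
    rw [h1] at hrstop; simp only [Int.natCast_zero, add_zero] at hrstop
    rw [hdigc] at hrstop; exact absurd hrstop (by simp)
  have hS0 : 0 ≤ pvS row c := by
    unfold pvS
    by_cases h1 : pvLeftLoop row c 0 = 1
    · omega
    · have := hldig (pvLeftLoop row c 0 - 1) (by omega) (by omega)
      rw [pvDigI_eq] at this
      omega
  have hdigAt : ∀ x : Int, pvS row c ≤ x → x < pvE row c → pvDigI row x = true := by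
    intro x hx1 hx2
    by_cases hxc : x ≤ c
    · have ho := hldig (c - x).toNat (by omega) (by unfold pvS at hx1; omega)
      have : c - ((c - x).toNat : Int) = x := by omega
      rwa [this] at ho
    · have ho := hrdig (x - c).toNat (by omega) (by unfold pvE at hx2; omega)
      have : c + ((x - c).toNat : Int) = x := by omega
      rwa [this] at ho
  have hSc : pvS row c ≤ c := by unfold pvS; omega
  have hcE : c < pvE row c := by unfold pvE; omega
  have hElen : (pvE row c : Int) ≤ (row.length : Int) := by
    have hd1 := hdigAt (pvE row c - 1) (by omega) (by omega)
    rw [pvDigI_eq] at hd1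
    have := pvDigN_lt row (pvE row c - 1).toNat hd1.2
    omega
  refine ⟨hS0, hSc, hcE, hElen, ?_, ?_, ?_, ?_, ?_⟩
  · omega
  · omega
  · intro q hq1 hq2
    have := hdigAt (q : Int) (by omega) (by omega)
    rw [pvDigI_eq] at this
    have hq : ((q : Int)).toNat = q := by omega
    rw [hq] at this
    unfold pvDigN
    exact this.2
  · by_cases hS : pvS row c = 0
    · left; omega
    · right
      have hstop := hlstop
      have heq : c - (pvLeftLoop row c 0 : Int) = pvS row c - 1 := by unfold pvS; ring
      rw [heq] at hstop
      rw [pvDigI] at hstop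
      have h1 : decide (0 ≤ pvS row c - 1) = true := by
        simp only [decide_eq_true_eq]; omega
      rw [h1, Bool.true_and] at hstop
      have h2 : (pvS row c - 1).toNat = (pvS row c).toNat - 1 := by omega
      rwa [h2] at hstop
  · have hstop := hrstop
    have heq : c + (pvRightLoop row c 0 : Int) = pvE row c := rfl
    rw [heq] at hstop
    rw [pvDigI] at hstop
    have h1 : decide (0 ≤ pvE row c) = true := by
      simp only [decide_eq_true_eq]; omega
    rwa [h1, Bool.true_and] at hstop

-- scans only look at cells between pvS - 1 and pvE, so they transfer to any row
-- that agrees there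
theorem pvLeftLoop_eq_of (row : List Char) (c : Int) (L : Nat)
    (hdig : ∀ o : Nat, o < L → pvDigI row (c - o) = true)
    (hstop : pvDigI row (c - (L : Int)) = false) :
    pvLeftLoop row c 0 = L := by
  obtain ⟨-, h1, h2⟩ := pvLeftLoop_prop row c 0
  rcases Nat.lt_trichotomy (pvLeftLoop row c 0) L with h | h | h
  · rw [hdig _ h] at h2; exact absurd h2 (by simp)
  · exact h
  · rw [h1 L (by omega) h] at hstop; exact absurd hstop (by simp)

theorem pvRightLoop_eq_of (row : List Char) (c : Int) (h0 : 0 ≤ c) (R : Nat)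
    (hdig : ∀ o : Nat, o < R → pvDigI row (c + o) = true)
    (hstop : pvDigI row (c + (R : Int)) = false) :
    pvRightLoop row c 0 = R := by
  obtain ⟨-, h1, h2⟩ := pvRightLoop_prop row c h0 0
  rcases Nat.lt_trichotomy (pvRightLoop row c 0) R with h | h | h
  · rw [hdig _ h] at h2; exact absurd h2 (by simp)
  · exact h
  · rw [h1 R (by omega) h] at hstop; exact absurd hstop (by simp)

theorem pvLeftLoop_congr (row row' : List Char) (c : Int)
    (hag : ∀ x : Int, c - (pvLeftLoop row c 0 : Int) ≤ x → x ≤ c → pvDigI row' x = pvDigI row x) :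
    pvLeftLoop row' c 0 = pvLeftLoop row c 0 := by
  obtain ⟨-, hdig, hstop⟩ := pvLeftLoop_prop row c 0
  apply pvLeftLoop_eq_of
  · intro o ho
    rw [hag _ (by omega) (by omega)]
    exact hdig o (by omega) ho
  · rw [hag _ (by omega) (by omega)]
    exact hstop

theorem pvRightLoop_congr (row row' : List Char) (c : Int) (h0 : 0 ≤ c)
    (hag : ∀ x : Int, c ≤ x → x ≤ c + (pvRightLoop row c 0 : Int) → pvDigI row' x = pvDigI row x) :
    pvRightLoop row' c 0 = pvRightLoop row c 0 := by
  obtain ⟨-, hdig, hstop⟩ := pvRightLoop_prop row c h0 0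
  apply pvRightLoop_eq_of row' c h0
  · intro o ho
    rw [hag _ (by omega) (by omega)]
    exact hdig o (by omega) ho
  · rw [hag _ (by omega) (by omega)]
    exact hstop

-- A's char-by-char erase loop: same length, '.' on [a, b), unchanged elsewhere
theorem pvEraseRange_spec (row : List Char) (a b : Int) (h0 : 0 ≤ a) (hb : b ≤ (row.length : Int)) :
    (pvEraseRange row a b).length = row.length ∧
      ∀ q : Nat, (pvEraseRange row a b).getD q ' ' =
        if a ≤ (q : Int) ∧ (q : Int) < b then '.' else row.getD q ' ' := by
  by_cases hab : b ≤ a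
  · unfold pvEraseRange
    rw [PySem.List.pyRange_one_eq_nil hab]
    refine ⟨rfl, fun q => ?_⟩
    rw [List.foldl_nil, if_neg (by omega)]
  · rw [Int.not_le] at hab
    have hlen : a.toNat < row.length := by omega
    have hstep : pvEraseRange row a b = pvEraseRange (row.set a.toNat '.') (a + 1) b := by
      unfold pvEraseRange
      rw [PySem.List.pyRange_one_cons hab, List.foldl_cons]
      congr 1
      rw [PySem.List.slice_to row h0, PySem.List.slice_from row (by omega : (0:Int) ≤ a + 1)]
      have : (a + 1).toNat = a.toNat + 1 := by omega
      rw [this]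
      rw [List.set_eq_take_append_cons_drop, if_pos hlen, List.append_assoc]
      rfl
    obtain ⟨ih1, ih2⟩ := pvEraseRange_spec (row.set a.toNat '.') (a + 1) b (by omega)
      (by rw [List.length_set]; omega)
    rw [hstep]
    refine ⟨by rw [ih1, List.length_set], fun q => ?_⟩
    rw [ih2 q]
    by_cases h1 : a + 1 ≤ (q : Int) ∧ (q : Int) < b
    · rw [if_pos h1, if_pos (by omega)]
    · rw [if_neg h1]
      have hset : (row.set a.toNat '.').getD q ' ' = if q = a.toNat then '.' else row.getD q ' ' := by
        rcases eq_or_ne q a.toNat with rfl | hne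
        · rw [if_pos rfl, List.getD_eq_getElem?_getD, List.getElem?_set_self (by omega)]
          rfl
        · rw [if_neg hne, List.getD_eq_getElem?_getD, List.getElem?_set_ne (by omega), ← List.getD_eq_getElem?_getD]
      rw [hset]
      rcases eq_or_ne q a.toNat with rfl | hne
      · rw [if_pos rfl, if_pos (by omega)]
      · rw [if_neg hne, if_neg (by omega)]
termination_by (b - a).toNat
decreasing_by omega

theorem pvBlank_length (row : List Char) (c : Int) (h0 : 0 ≤ c) (hd : pvDigN row c.toNat = true) :
    (pvBlank row c).length = row.length := by
  obtain ⟨hS0, -, -, hE, -⟩ := pvSpan_maxRun row c h0 hd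
  exact (pvEraseRange_spec row _ _ hS0 hE).1

theorem pvDigN_blank (row : List Char) (c : Int) (h0 : 0 ≤ c) (hd : pvDigN row c.toNat = true) (q : Nat) :
    pvDigN (pvBlank row c) q =
      if pvS row c ≤ (q : Int) ∧ (q : Int) < pvE row c then false else pvDigN row q := by
  obtain ⟨hS0, -, -, hE, -⟩ := pvSpan_maxRun row c h0 hd
  have hgd := (pvEraseRange_spec row _ _ hS0 hE).2 q
  unfold pvDigN pvBlank
  rw [show (pvEraseRange row (pvS row c) (pvE row c)).getD q ' ' =
      if pvS row c ≤ (q : Int) ∧ (q : Int) < pvE row c then '.' else row.getD q ' ' from hgd]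
  split
  · decide
  · rfl

theorem pvDigI_blank (row : List Char) (c : Int) (h0 : 0 ≤ c) (hd : pvDigN row c.toNat = true) (x : Int) :
    pvDigI (pvBlank row c) x =
      if pvS row c ≤ x ∧ x < pvE row c then false else pvDigI row x := by
  obtain ⟨hS0, -, -, -, -⟩ := pvSpan_maxRun row c h0 hd
  by_cases hx : 0 ≤ x
  · rw [pvDigI, pvDigI, pvDigN_blank row c h0 hd x.toNat]
    have hxx : ((x.toNat : Int)) = x := by omega
    rw [hxx]
    split
    · simp
    · rfl
  · rw [if_neg (by omega)]
    rw [pvDigI, pvDigI]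
    have : decide (0 ≤ x) = false := by simp; omega
    rw [this, Bool.false_and, Bool.false_and]

theorem take_drop_congr (r1 r2 : List Char) (hl : r1.length = r2.length) (a n : Nat)
    (h : ∀ q : Nat, a ≤ q → q < a + n → r1.getD q ' ' = r2.getD q ' ') :
    (r1.drop a).take n = (r2.drop a).take n := by
  apply List.ext_getElem?
  intro k
  rw [List.getElem?_take, List.getElem?_take]
  split
  · rw [List.getElem?_drop, List.getElem?_drop]
    by_cases hk : a + k < r1.length
    · rw [List.getElem?_eq_getElem hk, List.getElem?_eq_getElem (by omega)]
      have := h (a + k) (by omega) (by omega)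
      rw [List.getD_eq_getElem?_getD, List.getD_eq_getElem?_getD,
        List.getElem?_eq_getElem hk, List.getElem?_eq_getElem (by omega : a + k < r2.length)] at this
      simp only [Option.getD_some] at this
      rw [this]
    · rw [List.getElem?_eq_none (by omega), List.getElem?_eq_none (by omega)]
  · rfl

-- a digit cell c' whose span lies strictly right of the span blanked at c keeps
-- its scan results, its digit-ness and its parsed value
theorem pvSpan_blank_right (row : List Char) (c c' : Int)
    (h0 : 0 ≤ c) (hd : pvDigN row c.toNat = true)
    (h0' : 0 ≤ c') (hd' : pvDigN row c'.toNat = true)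
    (hsep : pvE row c ≤ pvS row c' - 1) :
    pvDigN (pvBlank row c) c'.toNat = true ∧
    pvS (pvBlank row c) c' = pvS row c' ∧ pvE (pvBlank row c) c' = pvE row c' ∧
    pvVal (pvBlank row c) c' = pvVal row c' := by
  obtain ⟨hS0, hSc, hcE, hElen, -⟩ := pvSpan_maxRun row c h0 hd
  obtain ⟨hS0', hSc', hcE', hElen', -⟩ := pvSpan_maxRun row c' h0' hd'
  have hdig' : pvDigN (pvBlank row c) c'.toNat = true := by
    rw [pvDigN_blank row c h0 hd c'.toNat, if_neg (by omega)]
    exact hd'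
  have hL : pvLeftLoop (pvBlank row c) c' 0 = pvLeftLoop row c' 0 := by
    apply pvLeftLoop_congr
    intro x hx1 hx2
    have hs' : pvS row c' = c' - (pvLeftLoop row c' 0 : Int) + 1 := rfl
    rw [pvDigI_blank row c h0 hd x, if_neg (by omega)]
  have hR : pvRightLoop (pvBlank row c) c' 0 = pvRightLoop row c' 0 := by
    apply pvRightLoop_congr row (pvBlank row c) c' h0'
    intro x hx1 hx2
    rw [pvDigI_blank row c h0 hd x, if_neg (by omega)]
  have hSe : pvS (pvBlank row c) c' = pvS row c' := by unfold pvS; rw [hL]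
  have hEe : pvE (pvBlank row c) c' = pvE row c' := by unfold pvE; rw [hR]
  refine ⟨hdig', hSe, hEe, ?_⟩
  unfold pvVal
  rw [hSe, hEe]
  have hblen : (pvBlank row c).length = row.length := pvBlank_length row c h0 hd
  rw [PySem.List.slice_toNat _ hS0' (by omega : (0:Int) ≤ pvE row c'),
    PySem.List.slice_toNat _ hS0' (by omega : (0:Int) ≤ pvE row c')]
  have hslice := take_drop_congr (pvBlank row c) row hblen (pvS row c').toNat
    ((pvE row c').toNat - (pvS row c').toNat) ?_
  · rw [hslice]
  · intro q hq1 hq2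
    have hgd := (pvEraseRange_spec row (pvS row c) (pvE row c) hS0 hElen).2 q
    unfold pvBlank
    rw [hgd, if_neg (by omega)]

-- a maximal run containing a digit cell IS the span found at that cell
theorem pvRun_eq_cell (row : List Char) (s e : Nat) (hmr : pvMaxRun row s e)
    (c : Int) (h0 : 0 ≤ c) (hd : pvDigN row c.toNat = true)
    (hin : (s : Int) ≤ c ∧ c < (e : Int)) :
    (s : Int) = pvS row c ∧ (e : Int) = pvE row c := by
  obtain ⟨hS0, hSc, hcE, hElen, hmr'⟩ := pvSpan_maxRun row c h0 hd
  have := pvMaxRun_unique row hmr hmr' (q := c.toNat) (by omega) (by omega)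
  omega

-- adjacent digit cells share one span
theorem pvSpan_adj (row : List Char) (c : Int) (h0 : 0 ≤ c)
    (hd : pvDigN row c.toNat = true) (hd1 : pvDigN row (c + 1).toNat = true) :
    pvS row (c + 1) = pvS row c ∧ pvE row (c + 1) = pvE row c := by
  obtain ⟨hS0, hSc, hcE, hElen, hmr⟩ := pvSpan_maxRun row c h0 hd
  have hlt : c + 1 < pvE row c := by
    rcases Int.lt_or_le (c + 1) (pvE row c) with h | h
    · exact h
    · exfalso
      have he : (pvE row c).toNat = (c + 1).toNat := by omega
      have := hmr.2.2.2.2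
      rw [he] at this
      rw [hd1] at this
      exact absurd this (by simp)
  have := pvRun_eq_cell row (pvS row c).toNat (pvE row c).toNat hmr (c + 1) (by omega) hd1
    (by omega)
  omega

-- one cell of A's inner loop, acting on (numbers, current row)
def pvCellStep (w : Int) (st : List Int × List Char) (c : Int) : List Int × List Char :=
  if 0 ≤ c ∧ c < w ∧ pvDigN st.2 c.toNat = true then (st.1 ++ [pvVal st.2 c], pvBlank st.2 c) else st

def pvCells (w : Int) (row : List Char) (j : Int) : List Int × List Char :=
  [j - 1, j, j + 1].foldl (pvCellStep w) ([], row)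

theorem pvCellStep_skip (w : Int) (st : List Int × List Char) (c : Int)
    (h : ¬(0 ≤ c ∧ c < w ∧ pvDigN st.2 c.toNat = true)) : pvCellStep w st c = st := by
  unfold pvCellStep; rw [if_neg h]

theorem pvCellStep_fire (w : Int) (st : List Int × List Char) (c : Int)
    (h : 0 ≤ c ∧ c < w ∧ pvDigN st.2 c.toNat = true) :
    pvCellStep w st c = (st.1 ++ [pvVal st.2 c], pvBlank st.2 c) := by
  unfold pvCellStep; rw [if_pos h]

theorem pvDigN_blank_false (row : List Char) (c : Int) (h0 : 0 ≤ c) (hd : pvDigN row c.toNat = true)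
    (x : Int) (hx0 : 0 ≤ x) (hx : pvDigN row x.toNat = false) :
    pvDigN (pvBlank row c) x.toNat = false := by
  rw [pvDigN_blank row c h0 hd x.toNat]
  split
  · rfl
  · rwa [show ((x.toNat : Nat) : Int) = x by omega] at *

theorem pvDigN_blank_in (row : List Char) (c : Int) (h0 : 0 ≤ c) (hd : pvDigN row c.toNat = true)
    (x : Int) (hx0 : 0 ≤ x) (hin : pvS row c ≤ x ∧ x < pvE row c) :
    pvDigN (pvBlank row c) x.toNat = false := by
  rw [pvDigN_blank row c h0 hd x.toNat, if_pos (by omega)]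

theorem pvSkip_blank (w : Int) (row : List Char) (c c' : Int) (h0 : 0 ≤ c)
    (hd : pvDigN row c.toNat = true)
    (hnd' : ¬(0 ≤ c' ∧ c' < w ∧ pvDigN row c'.toNat = true)) (st1 : List Int) :
    pvCellStep w (st1, pvBlank row c) c' = (st1, pvBlank row c) := by
  apply pvCellStep_skip
  rintro ⟨hb1, hb2, hb3⟩
  apply hnd'
  refine ⟨hb1, hb2, ?_⟩
  by_contra hf
  rw [Bool.not_eq_true] at hf
  rw [pvDigN_blank_false row c h0 hd c' hb1 hf] at hb3
  exact absurd hb3 (by simp)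

theorem pvSkip_in (w : Int) (row : List Char) (c c' : Int) (h0 : 0 ≤ c)
    (hd : pvDigN row c.toNat = true) (h0' : 0 ≤ c')
    (hin : pvS row c ≤ c' ∧ c' < pvE row c) (st1 : List Int) :
    pvCellStep w (st1, pvBlank row c) c' = (st1, pvBlank row c) := by
  apply pvCellStep_skip
  rintro ⟨hb1, hb2, hb3⟩
  rw [pvDigN_blank_in row c h0 hd c' h0' hin] at hb3
  exact absurd hb3 (by simp)

-- ===== B-side characterizations =====

-- B's left scan: digits on [altLeft, s), stops at 0 or a non-digit
theorem altLeft_prop (row : List Char) (s : Nat) :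
    altLeft row s ≤ s ∧
    (∀ q : Nat, altLeft row s ≤ q → q < s → pvDigN row q = true) ∧
    (altLeft row s = 0 ∨ pvDigN row (altLeft row s - 1) = false) := by
  induction s using altLeft.induct row with
  | case1 s h ih =>
    rw [altLeft, if_pos h]
    refine ⟨by omega, ?_, ih.2.2⟩
    intro q hq1 hq2
    rcases Nat.lt_or_ge q (s - 1) with hq | hq
    · exact ih.2.1 q hq1 hq
    · have : q = s - 1 := by omega
      subst this
      exact h.2
  | case2 s h =>
    rw [altLeft, if_neg h]
    refine ⟨le_refl _, by omega, ?_⟩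
    by_cases h0 : s = 0
    · exact Or.inl h0
    · right
      by_contra hx
      rw [Bool.not_eq_false] at hx
      exact h ⟨by omega, hx⟩

theorem altRight_prop (row : List Char) (e : Nat) :
    e ≤ altRight row e ∧
    (∀ q : Nat, e ≤ q → q < altRight row e → pvDigN row q = true) ∧
    pvDigN row (altRight row e) = false := by
  induction e using altRight.induct row with
  | case1 e h ih =>
    rw [altRight, dif_pos h]
    refine ⟨by omega, ?_, ih.2.2⟩
    intro q hq1 hq2
    rcases Nat.eq_or_lt_of_le hq1 with rfl | hq
    · exact h.2
    · exact ih.2.1 q hq hq2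
  | case2 e h =>
    rw [altRight, dif_neg h]
    refine ⟨le_refl _, by omega, ?_⟩
    by_contra hx
    rw [Bool.not_eq_false] at hx
    exact h ⟨pvDigN_lt row e hx, hx⟩

-- B's scans find exactly A's span
theorem altLeft_eq_pvS (row : List Char) (c : Int) (h0 : 0 ≤ c) (hd : pvDigN row c.toNat = true) :
    ((altLeft row c.toNat : Nat) : Int) = pvS row c := by
  obtain ⟨hS0, hSc, hcE, hElen, hmr⟩ := pvSpan_maxRun row c h0 hd
  obtain ⟨ha1, ha2, ha3⟩ := altLeft_prop row c.toNat
  rcases Int.lt_trichotomy ((altLeft row c.toNat : Nat) : Int) (pvS row c) with h | h | h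
  · exfalso
    have hx : pvDigN row ((pvS row c).toNat - 1) = true := by
      apply ha2 <;> omega
    rcases hmr.2.2.2.1 with hz | hf
    · omega
    · rw [hx] at hf; exact absurd hf (by simp)
  · exact h
  · exfalso
    have hx : pvDigN row (altLeft row c.toNat - 1) = true := by
      apply hmr.2.2.1 <;> omega
    rcases ha3 with hz | hf
    · omega
    · rw [hx] at hf; exact absurd hf (by simp)

theorem altRight_eq_pvE (row : List Char) (c : Int) (h0 : 0 ≤ c) (hd : pvDigN row c.toNat = true) :
    ((altRight row (c.toNat + 1) : Nat) : Int) = pvE row c := by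
  obtain ⟨hS0, hSc, hcE, hElen, hmr⟩ := pvSpan_maxRun row c h0 hd
  obtain ⟨ha1, ha2, ha3⟩ := altRight_prop row (c.toNat + 1)
  rcases Int.lt_trichotomy ((altRight row (c.toNat + 1) : Nat) : Int) (pvE row c) with h | h | h
  · exfalso
    have hx : pvDigN row (altRight row (c.toNat + 1)) = true := by
      apply hmr.2.2.1 <;> omega
    rw [hx] at ha3; exact absurd ha3 (by simp)
  · exact h
  · exfalso
    have hx : pvDigN row (pvE row c).toNat = true := by
      apply ha2 <;> omega
    have := hmr.2.2.2.2
    rw [hx] at this; exact absurd this (by simp)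

-- one cell of B's inner loop, acting on (numbers, seen spans)
def bStep (w : Int) (row : List Char) (r : Int) (st : List Int × PySem.Set (Int × Int)) (c : Int) :
    List Int × PySem.Set (Int × Int) :=
  if 0 ≤ c ∧ c < w ∧ pvDigN row c.toNat = true then
    if PySem.Set.contains st.2 (r, ((altLeft row c.toNat : Nat) : Int)) then st
    else
      (st.1 ++ [(PySem.Int.ofStr? (String.ofList
          (PySem.List.slice row (some ((altLeft row c.toNat : Nat) : Int))
            (some ((altRight row (c.toNat + 1) : Nat) : Int))))).getD 0],
       PySem.Set.add st.2 (r, ((altLeft row c.toNat : Nat) : Int)))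
  else st

theorem bStep_skip (w : Int) (row : List Char) (r : Int) (st : List Int × PySem.Set (Int × Int)) (c : Int)
    (h : ¬(0 ≤ c ∧ c < w ∧ pvDigN row c.toNat = true)) : bStep w row r st c = st := by
  unfold bStep; rw [if_neg h]

theorem bStep_mem (w : Int) (row : List Char) (r : Int) (st : List Int × PySem.Set (Int × Int)) (c : Int)
    (h : 0 ≤ c ∧ c < w ∧ pvDigN row c.toNat = true)
    (hm : (r, pvS row c) ∈ st.2) : bStep w row r st c = st := by
  unfold bStep
  rw [if_pos h, altLeft_eq_pvS row c h.1 h.2.2,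
    if_pos (by rw [PySem.Set.contains_iff st.2 _]; exact hm)]

theorem bStep_fire (w : Int) (row : List Char) (r : Int) (st : List Int × PySem.Set (Int × Int)) (c : Int)
    (h : 0 ≤ c ∧ c < w ∧ pvDigN row c.toNat = true)
    (hm : (r, pvS row c) ∉ st.2) :
    bStep w row r st c = (st.1 ++ [pvVal row c], PySem.Set.add st.2 (r, pvS row c)) := by
  unfold bStep
  rw [if_pos h, altLeft_eq_pvS row c h.1 h.2.2, altRight_eq_pvE row c h.1 h.2.2,
    if_neg (fun hc => hm ((PySem.Set.contains_iff st.2 _).mp hc))]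
  rfl

theorem bStep_seen (w : Int) (row : List Char) (r : Int) (st : List Int × PySem.Set (Int × Int)) (c : Int)
    (p : Int × Int) (hp : p ∈ (bStep w row r st c).2) : p ∈ st.2 ∨ p.1 = r := by
  unfold bStep at hp
  split at hp
  · split at hp
    · exact Or.inl hp
    · simp only at hp
      rcases (PySem.Set.mem_add _ _ _).mp hp with h | h
      · exact Or.inl h
      · right; rw [h]
  · exact Or.inl hp

theorem bFold_seen (w : Int) (row : List Char) (r : Int) (cs : List Int) :
    ∀ (st : List Int × PySem.Set (Int × Int)) (p : Int × Int),
      p ∈ (cs.foldl (bStep w row r) st).2 → p ∈ st.2 ∨ p.1 = r := by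
  induction cs with
  | nil => intro st p hp; exact Or.inl hp
  | cons c cs ih =>
    intro st p hp
    rw [List.foldl_cons] at hp
    rcases ih (bStep w row r st c) p hp with h | h
    · exact bStep_seen w row r st c p h
    · exact Or.inr h

-- THE per-row core: B's three-cell sweep with a fresh seen set appends exactly
-- the values A's three-cell erase sweep appends
theorem bRow_eq (w : Int) (row : List Char) (r j : Int) (nums : List Int)
    (seen : PySem.Set (Int × Int)) (hfresh : ∀ s : Int, (r, s) ∉ seen) :
    ([j - 1, j, j + 1].foldl (bStep w row r) (nums, seen)).1 = nums ++ (pvCells w row j).1 := by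
  unfold pvCells
  simp only [List.foldl_cons, List.foldl_nil]
  by_cases hD0 : 0 ≤ j - 1 ∧ j - 1 < w ∧ pvDigN row (j - 1).toNat = true
  · obtain ⟨hS00, hSc0, hcE0, hElen0, hmr0⟩ := pvSpan_maxRun row (j - 1) hD0.1 hD0.2.2
    rw [pvCellStep_fire w ([], row) (j - 1) hD0,
      bStep_fire w row r (nums, seen) (j - 1) hD0 (hfresh _)]
    simp only [List.nil_append]
    by_cases hD1 : 0 ≤ j ∧ j < w ∧ pvDigN row j.toNat = true
    · have hadj01 := pvSpan_adj row (j - 1) hD0.1 hD0.2.2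
        (by rw [show j - 1 + 1 = j by ring]; exact hD1.2.2)
      rw [show j - 1 + 1 = j by ring] at hadj01
      obtain ⟨hS01, hSc1, hcE1, hElen1, hmr1⟩ := pvSpan_maxRun row j hD1.1 hD1.2.2
      rw [pvSkip_in w row (j - 1) j hD0.1 hD0.2.2 hD1.1 (by omega) [pvVal row (j - 1)],
        bStep_mem w row r _ j hD1
          (by rw [hadj01.1]; exact (PySem.Set.mem_add _ _ _).mpr (Or.inr rfl))]
      by_cases hD2 : 0 ≤ j + 1 ∧ j + 1 < w ∧ pvDigN row (j + 1).toNat = true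
      · have hadj12 := pvSpan_adj row j hD1.1 hD1.2.2 hD2.2.2
        obtain ⟨hS02, hSc2, hcE2, hElen2, hmr2⟩ := pvSpan_maxRun row (j + 1) hD2.1 hD2.2.2
        rw [pvSkip_in w row (j - 1) (j + 1) hD0.1 hD0.2.2 hD2.1 (by omega) [pvVal row (j - 1)],
          bStep_mem w row r _ (j + 1) hD2
            (by rw [hadj12.1, hadj01.1]; exact (PySem.Set.mem_add _ _ _).mpr (Or.inr rfl))]
      · rw [pvSkip_blank w row (j - 1) (j + 1) hD0.1 hD0.2.2 hD2 [pvVal row (j - 1)],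
          bStep_skip w row r _ (j + 1) hD2]
    · rw [pvSkip_blank w row (j - 1) j hD0.1 hD0.2.2 hD1 [pvVal row (j - 1)],
        bStep_skip w row r _ j hD1]
      by_cases hD2 : 0 ≤ j + 1 ∧ j + 1 < w ∧ pvDigN row (j + 1).toNat = true
      · have hd1f' : pvDigN row j.toNat = false := by
          by_contra hf
          rw [Bool.not_eq_false] at hf
          exact hD1 ⟨by omega, by omega, hf⟩
        obtain ⟨hS02, hSc2, hcE2, hElen2, hmr2⟩ := pvSpan_maxRun row (j + 1) hD2.1 hD2.2.2
        have hE0 : pvE row (j - 1) ≤ j := by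
          by_contra hx
          have := hmr0.2.2.1 j.toNat (by omega) (by omega)
          rw [this] at hd1f'; exact absurd hd1f' (by simp)
        have hS2 : j + 1 ≤ pvS row (j + 1) := by
          by_contra hx
          have := hmr2.2.2.1 j.toNat (by omega) (by omega)
          rw [this] at hd1f'; exact absurd hd1f' (by simp)
        obtain ⟨hdig2, hSe2, hEe2, hVe2⟩ := pvSpan_blank_right row (j - 1) (j + 1)
          hD0.1 hD0.2.2 hD2.1 hD2.2.2 (by omega)
        rw [pvCellStep_fire w ([pvVal row (j - 1)], pvBlank row (j - 1)) (j + 1)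
          ⟨hD2.1, hD2.2.1, hdig2⟩]
        simp only
        rw [hVe2]
        rw [bStep_fire w row r _ (j + 1) hD2 ?_]
        · simp
        · intro hmem
          rcases (PySem.Set.mem_add _ _ _).mp hmem with h | h
          · exact hfresh _ h
          · have : pvS row (j + 1) = pvS row (j - 1) := by
              have := Prod.mk.injEq r (pvS row (j + 1)) r (pvS row (j - 1)) ▸ h
              exact (Prod.mk.inj h).2
            omega
      · rw [pvSkip_blank w row (j - 1) (j + 1) hD0.1 hD0.2.2 hD2 [pvVal row (j - 1)],
          bStep_skip w row r _ (j + 1) hD2]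
  · rw [pvCellStep_skip w ([], row) (j - 1) hD0, bStep_skip w row r (nums, seen) (j - 1) hD0]
    by_cases hD1 : 0 ≤ j ∧ j < w ∧ pvDigN row j.toNat = true
    · obtain ⟨hS01, hSc1, hcE1, hElen1, hmr1⟩ := pvSpan_maxRun row j hD1.1 hD1.2.2
      rw [pvCellStep_fire w ([], row) j hD1, bStep_fire w row r (nums, seen) j hD1 (hfresh _)]
      simp only [List.nil_append]
      by_cases hD2 : 0 ≤ j + 1 ∧ j + 1 < w ∧ pvDigN row (j + 1).toNat = true
      · have hadj12 := pvSpan_adj row j hD1.1 hD1.2.2 hD2.2.2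
        obtain ⟨hS02, hSc2, hcE2, hElen2, hmr2⟩ := pvSpan_maxRun row (j + 1) hD2.1 hD2.2.2
        rw [pvSkip_in w row j (j + 1) hD1.1 hD1.2.2 hD2.1 (by omega) [pvVal row j],
          bStep_mem w row r _ (j + 1) hD2
            (by rw [hadj12.1]; exact (PySem.Set.mem_add _ _ _).mpr (Or.inr rfl))]
      · rw [pvSkip_blank w row j (j + 1) hD1.1 hD1.2.2 hD2 [pvVal row j],
          bStep_skip w row r _ (j + 1) hD2]
    · rw [pvCellStep_skip w ([], row) j hD1, bStep_skip w row r (nums, seen) j hD1]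
      by_cases hD2 : 0 ≤ j + 1 ∧ j + 1 < w ∧ pvDigN row (j + 1).toNat = true
      · rw [pvCellStep_fire w ([], row) (j + 1) hD2,
          bStep_fire w row r (nums, seen) (j + 1) hD2 (hfresh _)]
        simp
      · rw [pvCellStep_skip w ([], row) (j + 1) hD2, bStep_skip w row r (nums, seen) (j + 1) hD2]
        simp

-- ===== shared row/width notation and A's decomposition =====
def pvRowOf (g : List String) (r : Int) : List Char := (g.getD r.toNat "").toList
def pvWidth (g : List String) (i : Int) : Int := (((PySem.List.pyGet? g i).getD "").length : Int)

-- the body of A's inner loop over l, as the port's lambda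
def pvABody (i j k : Int) (st : List Int × List String) (l : Int) : List Int × List String :=
  if 0 ≤ i + k ∧ i + k < (st.2.length : Int) ∧ 0 ≤ j + l ∧
      j + l < (((PySem.List.pyGet? st.2 i).getD "").length : Int) then
    if PySem.Chars.isdigit ((PySem.List.pyGetD st.2 (i + k) "").toList.getD (j + l).toNat ' ') then
      let res := pvReadNumberAndEraseIt st.2 (i + k) (j + l)
      (st.1 ++ [res.1], res.2)
    else st
  else st

theorem pvRead_eq (grid : List String) (i j : Int) :
    read_numbers_near_symbol grid i j =
      ((PySem.List.pyRange (-1) 2 1).foldl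
        (fun st k => (PySem.List.pyRange (-1) 2 1).foldl (pvABody i j k) st)
        (([] : List Int), grid)).1 := rfl

theorem pvRowOf_toList (g : List String) (r : Int) (h0 : 0 ≤ r) (h1 : r < (g.length : Int)) :
    (PySem.List.pyGetD g r "").toList = pvRowOf g r := by
  rw [PySem.List.pyGetD_eq_getElem g "" h0 h1]
  unfold pvRowOf
  rw [List.getD_eq_getElem?_getD, List.getElem?_eq_getElem (by omega)]
  rfl

theorem pvRnae_eq (g : List String) (r c : Int) (hr0 : 0 ≤ r) (hrn : r < (g.length : Int))
    (hc0 : 0 ≤ c) :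
    pvReadNumberAndEraseIt g r c =
      (pvVal (pvRowOf g r) c, g.set r.toNat (String.ofList (pvBlank (pvRowOf g r) c))) := by
  unfold pvReadNumberAndEraseIt
  rw [pvRowOf_toList g r hr0 hrn]
  rfl

theorem pvSet_self (g : List String) (r : Int) (hr0 : 0 ≤ r) (hrn : r < (g.length : Int)) :
    g.set r.toNat (String.ofList (pvRowOf g r)) = g := by
  unfold pvRowOf
  rw [List.getD_eq_getElem?_getD, List.getElem?_eq_getElem (by omega : r.toNat < g.length)]
  simp

theorem pvRowOf_set_self (g : List String) (r : Int) (row' : List Char)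
    (hr0 : 0 ≤ r) (hrn : r < (g.length : Int)) :
    pvRowOf (g.set r.toNat (String.ofList row')) r = row' := by
  unfold pvRowOf
  rw [List.getD_eq_getElem?_getD, List.getElem?_set_self (by omega : r.toNat < g.length)]
  simp

theorem pvRowOf_set_ne (g : List String) (n : Nat) (s : String) (r' : Int)
    (h : (r' : Int).toNat ≠ n) :
    pvRowOf (g.set n s) r' = pvRowOf g r' := by
  unfold pvRowOf
  rw [List.getD_eq_getElem?_getD, List.getD_eq_getElem?_getD,
    List.getElem?_set_ne (by omega)]

theorem pvWidth_set (g : List String) (n : Nat) (s : String) (i : Int)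
    (hn : n < g.length) (hlen : s.length = (g.getD n "").length) :
    pvWidth (g.set n s) i = pvWidth g i := by
  have key : ∀ k : Nat, ((g.set n s)[k]?.getD "").length = (g[k]?.getD "").length := by
    intro k
    by_cases hk : k = n
    · subst hk
      rw [List.getElem?_set_self hn, List.getElem?_eq_getElem hn]
      rw [List.getD_eq_getElem?_getD, List.getElem?_eq_getElem hn] at hlen
      simpa using hlen
    · rw [List.getElem?_set_ne (by omega)]
  unfold pvWidth
  simp only [PySem.List.pyGet?, PySem.List.pyIdx?, List.length_set]
  by_cases h0 : 0 ≤ i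
  · by_cases h1 : i < (g.length : Int)
    · simp only [if_pos h0, if_pos h1, Option.bind_some]
      rw [key]
    · simp only [if_pos h0, if_neg h1, Option.bind_none]
  · by_cases h2 : -(g.length : Int) ≤ i
    · simp only [if_neg h0, if_pos h2, Option.bind_some]
      rw [key]
    · simp only [if_neg h0, if_neg h2, Option.bind_none]

theorem pvCellStep_len (w : Int) (st : List Int × List Char) (c : Int) :
    (pvCellStep w st c).2.length = st.2.length := by
  unfold pvCellStep
  split
  · rename_i h
    exact pvBlank_length st.2 c h.1 h.2.2
  · rfl

theorem pvCellStep_prefix (w : Int) (cs : List Int) :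
    ∀ (nums : List Int) (row : List Char),
      cs.foldl (pvCellStep w) (nums, row) =
        (nums ++ (cs.foldl (pvCellStep w) ([], row)).1, (cs.foldl (pvCellStep w) ([], row)).2) := by
  induction cs with
  | nil => intro nums row; simp
  | cons c cs ih =>
    intro nums row
    simp only [List.foldl_cons]
    by_cases h : 0 ≤ c ∧ c < w ∧ pvDigN row c.toNat = true
    · rw [pvCellStep_fire w (nums, row) c h, pvCellStep_fire w ([], row) c h]
      rw [ih (nums ++ [pvVal row c]) (pvBlank row c), ih ([] ++ [pvVal row c]) (pvBlank row c)]
      simp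
    · rw [pvCellStep_skip w (nums, row) c h, pvCellStep_skip w ([], row) c h]
      exact ih nums row

theorem pvABody_invalid (i j k l : Int) (st : List Int × List String)
    (h : ¬(0 ≤ i + k ∧ i + k < (st.2.length : Int))) : pvABody i j k st l = st := by
  unfold pvABody
  rw [if_neg (by tauto)]

theorem pvABody_step (i j k l : Int) (nums : List Int) (g : List String) (row' : List Char)
    (hr : 0 ≤ i + k ∧ i + k < (g.length : Int))
    (hlen : row'.length = (pvRowOf g (i + k)).length) :
    pvABody i j k (nums, g.set (i + k).toNat (String.ofList row')) l =
      ((pvCellStep (pvWidth g i) (nums, row') (j + l)).1,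
        g.set (i + k).toNat (String.ofList (pvCellStep (pvWidth g i) (nums, row') (j + l)).2)) := by
  have hn : (i + k).toNat < g.length := by omega
  have hlen' : (String.ofList row').length = (g.getD (i + k).toNat "").length := by
    simp only [String.length_ofList, hlen]
    unfold pvRowOf
    simp
  have hglen : ((g.set (i + k).toNat (String.ofList row')).length : Int) = (g.length : Int) := by
    rw [List.length_set]
  have hwidth : pvWidth (g.set (i + k).toNat (String.ofList row')) i = pvWidth g i :=
    pvWidth_set g (i + k).toNat (String.ofList row') i hn hlen'
  have hrow : pvRowOf (g.set (i + k).toNat (String.ofList row')) (i + k) = row' :=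
    pvRowOf_set_self g (i + k) row' hr.1 hr.2
  unfold pvABody
  simp only
  rw [hglen]
  rw [show (((PySem.List.pyGet? (g.set (i + k).toNat (String.ofList row')) i).getD "").length : Int)
      = pvWidth g i from hwidth]
  by_cases hb : 0 ≤ j + l ∧ j + l < pvWidth g i
  · rw [if_pos ⟨hr.1, by omega, hb.1, hb.2⟩]
    rw [pvRowOf_toList _ (i + k) hr.1 (by omega), hrow]
    by_cases hdig : pvDigN row' (j + l).toNat = true
    · rw [if_pos (by unfold pvDigN at hdig; exact hdig)]
      rw [pvRnae_eq _ (i + k) (j + l) hr.1 (by omega) hb.1]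
      rw [hrow, List.set_set]
      rw [pvCellStep_fire _ _ _ ⟨hb.1, hb.2, hdig⟩]
    · rw [if_neg (by unfold pvDigN at hdig; exact hdig)]
      rw [pvCellStep_skip _ _ _ (by rintro ⟨-, -, h3⟩; exact hdig h3)]
  · rw [if_neg (by tauto)]
    rw [pvCellStep_skip _ _ _ (by rintro ⟨h1, h2, -⟩; exact hb ⟨h1, h2⟩)]

theorem pvInner_eq (i j k : Int) (nums : List Int) (g : List String) :
    (PySem.List.pyRange (-1) 2 1).foldl (pvABody i j k) (nums, g) =
      if 0 ≤ i + k ∧ i + k < (g.length : Int) then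
        (nums ++ (pvCells (pvWidth g i) (pvRowOf g (i + k)) j).1,
          g.set (i + k).toNat (String.ofList (pvCells (pvWidth g i) (pvRowOf g (i + k)) j).2))
      else (nums, g) := by
  have hrange : PySem.List.pyRange (-1) 2 1 = [-1, 0, 1] := by decide
  rw [hrange]
  simp only [List.foldl_cons, List.foldl_nil]
  by_cases hr : 0 ≤ i + k ∧ i + k < (g.length : Int)
  · rw [if_pos hr]
    have hg0 : (nums, g) = (nums, g.set (i + k).toNat (String.ofList (pvRowOf g (i + k)))) := by
      rw [pvSet_self g (i + k) hr.1 hr.2]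
    rw [hg0]
    rw [pvABody_step i j k (-1) nums g (pvRowOf g (i + k)) hr rfl]
    rw [pvABody_step i j k 0 _ g _ hr (pvCellStep_len _ _ _)]
    rw [pvABody_step i j k 1 _ g _ hr
      (by rw [pvCellStep_len, pvCellStep_len])]
    rw [show j + -1 = j - 1 by ring, show j + 0 = j by ring]
    simp only [Prod.mk.eta]
    have hp := pvCellStep_prefix (pvWidth g i) [j - 1, j, j + 1] nums (pvRowOf g (i + k))
    simp only [List.foldl_cons, List.foldl_nil] at hp
    unfold pvCells
    simp only [List.foldl_cons, List.foldl_nil]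
    rw [hp]
  · rw [if_neg hr]
    rw [pvABody_invalid i j k (-1) (nums, g) hr,
      pvABody_invalid i j k 0 (nums, g) hr,
      pvABody_invalid i j k 1 (nums, g) hr]

theorem pvCells_len (w : Int) (row : List Char) (j : Int) :
    (pvCells w row j).2.length = row.length := by
  unfold pvCells
  simp only [List.foldl_cons, List.foldl_nil, pvCellStep_len]

theorem pvOuter_step (i j k : Int) (g0 g : List String) (nums : List Int)
    (hlen : g.length = g0.length) (hw : pvWidth g i = pvWidth g0 i)
    (hrow : 0 ≤ i + k → i + k < (g0.length : Int) → pvRowOf g (i + k) = pvRowOf g0 (i + k)) :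
    ∃ g' : List String,
      (PySem.List.pyRange (-1) 2 1).foldl (pvABody i j k) (nums, g) =
        (nums ++ (if 0 ≤ i + k ∧ i + k < (g0.length : Int) then
            (pvCells (pvWidth g0 i) (pvRowOf g0 (i + k)) j).1 else []), g') ∧
      g'.length = g0.length ∧ pvWidth g' i = pvWidth g0 i ∧
      (∀ r' : Int, 0 ≤ r' → r' ≠ i + k → pvRowOf g' r' = pvRowOf g r') := by
  rw [pvInner_eq]
  have hli : (g.length : Int) = (g0.length : Int) := by rw [hlen]
  by_cases hr : 0 ≤ i + k ∧ i + k < (g.length : Int)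
  · rw [if_pos hr, if_pos (by omega)]
    have hrow' := hrow hr.1 (by omega)
    have hn : (i + k).toNat < g.length := by omega
    have hclen : (String.ofList (pvCells (pvWidth g i) (pvRowOf g (i + k)) j).2).length
        = (g.getD (i + k).toNat "").length := by
      rw [String.length_ofList, pvCells_len]
      unfold pvRowOf
      simp
    refine ⟨g.set (i + k).toNat (String.ofList (pvCells (pvWidth g i) (pvRowOf g (i + k)) j).2),
      ?_, ?_, ?_, ?_⟩
    · rw [hw, hrow']
    · rw [List.length_set, hlen]
    · rw [pvWidth_set g (i + k).toNat _ i hn hclen, hw]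
    · intro r' h0' hne
      exact pvRowOf_set_ne g (i + k).toNat _ r' (by omega)
  · rw [if_neg hr, if_neg (by omega)]
    exact ⟨g, by simp, hlen, hw, fun r' _ _ => rfl⟩

theorem pvA_decomp (g : List String) (i j : Int) :
    read_numbers_near_symbol g i j =
      (if 0 ≤ i - 1 ∧ i - 1 < (g.length : Int) then
        (pvCells (pvWidth g i) (pvRowOf g (i - 1)) j).1 else []) ++
      ((if 0 ≤ i ∧ i < (g.length : Int) then
        (pvCells (pvWidth g i) (pvRowOf g i) j).1 else []) ++
       (if 0 ≤ i + 1 ∧ i + 1 < (g.length : Int) then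
        (pvCells (pvWidth g i) (pvRowOf g (i + 1)) j).1 else [])) := by
  rw [pvRead_eq]
  have hrange : PySem.List.pyRange (-1) 2 1 = [-1, 0, 1] := by decide
  rw [hrange]
  simp only [List.foldl_cons, List.foldl_nil]
  obtain ⟨g1, e1, hl1, hw1, hrows1⟩ :=
    pvOuter_step i j (-1) g g ([] : List Int) rfl rfl (fun _ _ => rfl)
  rw [hrange] at e1
  simp only [List.foldl_cons, List.foldl_nil] at e1
  rw [e1]
  obtain ⟨g2, e2, hl2, hw2, hrows2⟩ :=
    pvOuter_step i j 0 g g1 ([] ++ (if 0 ≤ i + -1 ∧ i + -1 < (g.length : Int) then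
        (pvCells (pvWidth g i) (pvRowOf g (i + -1)) j).1 else [])) hl1 hw1
      (fun h0 h1 => by rw [hrows1 (i + 0) (by omega) (by omega)])
  rw [hrange] at e2
  simp only [List.foldl_cons, List.foldl_nil] at e2
  rw [e2]
  obtain ⟨g3, e3, hl3, hw3, hrows3⟩ :=
    pvOuter_step i j 1 g g2 _ hl2 hw2
      (fun h0 h1 => by
        rw [hrows2 (i + 1) (by omega) (by omega), hrows1 (i + 1) (by omega) (by omega)])
  rw [hrange] at e3
  simp only [List.foldl_cons, List.foldl_nil] at e3
  rw [e3]
  simp only [show i + -1 = i - 1 by ring, show i + 0 = i by ring, List.nil_append,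
    List.append_assoc]

-- ===== B's decomposition =====
theorem pvRange3 (a : Int) : PySem.List.pyRange (a - 1) (a + 2) 1 = [a - 1, a, a + 1] := by
  rw [PySem.List.pyRange_one_cons (by omega), show a - 1 + 1 = a by ring,
    PySem.List.pyRange_one_cons (by omega : a < a + 2),
    PySem.List.pyRange_one_cons (by omega : a + 1 < a + 2),
    PySem.List.pyRange_one_eq_nil (by omega : a + 2 ≤ a + 1 + 1)]

-- the body of B's row loop, as the port's lambda
def bRowStep (grid : List String) (i j : Int) (st : List Int × PySem.Set (Int × Int)) (r : Int) :
    List Int × PySem.Set (Int × Int) :=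
  if 0 ≤ r ∧ r < (grid.length : Int) then
    [j - 1, j, j + 1].foldl (bStep (pvWidth grid i) ((PySem.List.pyGetD grid r "").toList) r) st
  else st

theorem pvAlt_eq (grid : List String) (i j : Int) :
    read_numbers_near_symbol_alt grid i j =
      ([i - 1, i, i + 1].foldl (bRowStep grid i j)
        (([] : List Int), (PySem.Set.empty : PySem.Set (Int × Int)))).1 := by
  unfold read_numbers_near_symbol_alt bRowStep bStep pvWidth pvDigN
  rw [pvRange3 i, pvRange3 j]

theorem bRowStep_eq (grid : List String) (i j : Int) (st : List Int × PySem.Set (Int × Int)) (r : Int)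
    (hfresh : ∀ s : Int, (r, s) ∉ st.2) :
    (bRowStep grid i j st r).1 = st.1 ++
      (if 0 ≤ r ∧ r < (grid.length : Int) then
        (pvCells (pvWidth grid i) (pvRowOf grid r) j).1 else []) ∧
    ∀ p ∈ (bRowStep grid i j st r).2, p ∈ st.2 ∨ p.1 = r := by
  unfold bRowStep
  by_cases hr : 0 ≤ r ∧ r < (grid.length : Int)
  · rw [if_pos hr, if_pos hr, pvRowOf_toList grid r hr.1 hr.2]
    constructor
    · have := bRow_eq (pvWidth grid i) (pvRowOf grid r) r j st.1 st.2 hfresh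
      simpa using this
    · intro p hp
      exact bFold_seen _ _ r [j - 1, j, j + 1] (st.1, st.2) p (by simpa using hp)
  · rw [if_neg hr, if_neg hr]
    exact ⟨by simp, fun p hp => Or.inl hp⟩

-- ===== VERDICT (by name: the statement is the Claim_ definition above) =====
theorem read_numbers_near_symbol_spec : Claim_equal_read_numbers_near_symbol := by
  intro grid i j hdom hpre
  unfold Spec_read_numbers_near_symbol
  rw [pvA_decomp, pvAlt_eq]
  simp only [List.foldl_cons, List.foldl_nil]
  set st0 : List Int × PySem.Set (Int × Int) := (([] : List Int), PySem.Set.empty) with hst0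
  have hfresh0 : ∀ s : Int, ((i - 1 : Int), s) ∉ st0.2 := by
    intro s h; exact absurd h (List.not_mem_nil)
  obtain ⟨e1, hseen1⟩ := bRowStep_eq grid i j st0 (i - 1) hfresh0
  have hfresh1 : ∀ s : Int, ((i : Int), s) ∉ (bRowStep grid i j st0 (i - 1)).2 := by
    intro s h
    rcases hseen1 (i, s) h with h' | h'
    · exact absurd h' (List.not_mem_nil)
    · simp only at h'; omega
  obtain ⟨e2, hseen2⟩ := bRowStep_eq grid i j (bRowStep grid i j st0 (i - 1)) i hfresh1
  have hfresh2 : ∀ s : Int, ((i + 1 : Int), s) ∉ (bRowStep grid i j (bRowStep grid i j st0 (i - 1)) i).2 := by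
    intro s h
    rcases hseen2 (i + 1, s) h with h' | h'
    · rcases hseen1 (i + 1, s) h' with h'' | h''
      · exact absurd h'' (List.not_mem_nil)
      · simp only at h''; omega
    · simp only at h'; omega
  obtain ⟨e3, -⟩ := bRowStep_eq grid i j
    (bRowStep grid i j (bRowStep grid i j st0 (i - 1)) i) (i + 1) hfresh2
  rw [e3, e2, e1]
  simp [hst0, List.append_assoc]
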